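-- pv_equiv track=rewrite | github.com/KarolinaPSouza/dataset-pesquisa | 1666-Building_Roads/11801263.py | find_minimum_roads
-- ===== SOURCE A (Python) =====
-- from collections import defaultdict, deque
--
-- def find_minimum_roads(n, m, roads):
--     graph = defaultdict(list)
--
--     for a, b in roads:
--         graph[a].append(b)
--         graph[b].append(a)
--
--     visited = [False] * (n + 1)
--     components = []
--
--     def bfs(node):
--         queue = deque([node])
--         visited[node] = True
--         component = []
--         while queue:
--             curr = queue.popleft()
--             component.append(curr)
--             for neighbor in graph[curr]:
--                 if not visited[neighbor]:
--                     visited[neighbor] = True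
--                     queue.append(neighbor)
--         return component
--
--     for city in range(1, n + 1):
--         if not visited[city]:
--             components.append(bfs(city))
--
--     k = len(components) - 1
--     new_roads = []
--     for i in range(len(components) - 1):
--         new_roads.append((components[i][0], components[i + 1][0]))
--
--     return k, new_roads
-- ===== SOURCE B (Python) =====
-- def find_minimum_roads(n, m, roads):
--     # Minimum-label propagation: every node starts labelled with itself; labels
--     # relax along edges (alternating scan direction) until a fixpoint, after
--     # which a node keeping its own label is exactly its component's minimum.
--     if n < 1:
--         return -1, []
--     label = list(range(n + 1))
--     backward = False
--     while True:
--         changed = False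
--         for a, b in (reversed(roads) if backward else roads):
--             t = label[a] if label[a] < label[b] else label[b]
--             if label[a] != t:
--                 label[a] = t
--                 changed = True
--             if label[b] != t:
--                 label[b] = t
--                 changed = True
--         if not changed:
--             break
--         backward = not backward
--     reps = [v for v in range(1, n + 1) if label[v] == v]
--     return len(reps) - 1, list(zip(reps, reps[1:]))
-- ===== Notes on version B (the rewrite author's own statement) =====
-- stated objective: alternative
-- what changed: Replaces the adjacency-dict + per-city BFS component search with minimum-label propagation: every node starts labelled with itself, labels relax along the edge list (alternating scan direction) until a fixpoint, and the nodes that keep their own label are exactly the component minima, i.e. A's representatives in A's order.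
-- outside the precondition, e.g. on find_minimum_roads(3, 2, [(-1, 1), (3, 2)]): A returns (1, [(1, 2)]), B returns (0, [])
import Mathlib
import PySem

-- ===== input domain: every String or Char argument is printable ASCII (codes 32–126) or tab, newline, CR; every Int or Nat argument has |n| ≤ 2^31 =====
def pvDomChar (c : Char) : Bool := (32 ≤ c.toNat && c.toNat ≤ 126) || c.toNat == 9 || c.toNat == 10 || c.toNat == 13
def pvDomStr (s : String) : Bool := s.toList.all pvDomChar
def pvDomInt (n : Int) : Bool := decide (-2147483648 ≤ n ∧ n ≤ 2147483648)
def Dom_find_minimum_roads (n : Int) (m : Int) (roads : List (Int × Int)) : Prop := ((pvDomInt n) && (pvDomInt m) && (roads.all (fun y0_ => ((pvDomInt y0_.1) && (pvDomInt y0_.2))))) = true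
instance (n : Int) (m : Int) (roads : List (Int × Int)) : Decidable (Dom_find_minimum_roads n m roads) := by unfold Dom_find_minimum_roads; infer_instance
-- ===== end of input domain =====

-- B replaces A's adjacency-dict + per-city BFS with minimum-label propagation to a
-- fixpoint (alternative algorithm of similar cost; no speed claim); equal on Pre_.


-- ===== PORT A =====
-- visited[v] read / write; index v.toNat is exact for the 0 ≤ v < len(visited) accesses Pre_ guarantees
def pvVget (vis : List Bool) (v : Int) : Bool := vis.getD v.toNat false
def pvVset (vis : List Bool) (v : Int) : List Bool := vis.set v.toNat true

-- graph = defaultdict(list); for a, b in roads: graph[a].append(b); graph[b].append(a)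
def pvBuildGraph (roads : List (Int × Int)) : PySem.Dict Int (List Int) :=
  roads.foldl (fun g ab =>
    let g1 := g.insert ab.1 (g.getD ab.1 [] ++ [ab.2])
    g1.insert ab.2 (g1.getD ab.2 [] ++ [ab.1])) PySem.Dict.empty

-- the 'while queue:' BFS loop; fuel only bounds the number of iterations (pops), which
-- under Pre_ is at most len(visited) + 1, so the loop always runs to queue exhaustion
def pvBfsLoop (graph : PySem.Dict Int (List Int)) :
    Nat → List Int → List Bool → List Int → List Int × List Bool
  | 0, _, vis, comp => (comp, vis)
  | _ + 1, [], vis, comp => (comp, vis)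
  | fuel + 1, curr :: rest, vis, comp =>
      let st := (graph.getD curr []).foldl
        (fun (st : List Int × List Bool) nb =>
          if pvVget st.2 nb then st else (st.1 ++ [nb], pvVset st.2 nb)) (rest, vis)
      pvBfsLoop graph fuel st.1 st.2 (comp ++ [curr])

def find_minimum_roads (n : Int) (m : Int) (roads : List (Int × Int)) : Int × (List (Int × Int)) :=
  let graph := pvBuildGraph roads
  let visited0 : List Bool := List.replicate (n + 1).toNat false
  let st := (PySem.List.pyRange 1 (n + 1) 1).foldl
    (fun (st : List (List Int) × List Bool) city =>
      if pvVget st.2 city then st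
      else
        let r := pvBfsLoop graph (st.2.length + 1) [city] (pvVset st.2 city) []
        (st.1 ++ [r.1], r.2)) ([], visited0)
  let components := st.1
  let k : Int := (components.length : Int) - 1
  let new_roads := (PySem.List.pyRange 0 ((components.length : Int) - 1) 1).map
    (fun i => ((components.getD i.toNat []).getD 0 0, (components.getD (i.toNat + 1) []).getD 0 0))
  (k, new_roads)

-- ===== PORT B =====
-- label[v] read / write; index v.toNat is exact for the 0 ≤ v < len(label) accesses Pre_ guarantees
def pvLget (label : List Int) (v : Int) : Int := label.getD v.toNat 0
def pvLset (label : List Int) (v : Int) (t : Int) : List Int := label.set v.toNat t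

-- the body of the 'for a, b in …' relaxation loop, on the (label, changed) state
def pvRelaxStepFn (st : List Int × Bool) (ab : Int × Int) : List Int × Bool :=
  let la := pvLget st.1 ab.1
  let lb := pvLget st.1 ab.2
  let t := if la < lb then la else lb
  let st1 := if la ≠ t then (pvLset st.1 ab.1 t, true) else st
  if pvLget st1.1 ab.2 ≠ t then (pvLset st1.1 ab.2 t, true) else st1

-- one relaxation pass
def pvRelaxPass (rs : List (Int × Int)) (st0 : List Int × Bool) : List Int × Bool :=
  rs.foldl pvRelaxStepFn st0

-- the 'while True: … if not changed: break' loop; fuel only bounds the rounds: every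
-- changed round strictly decreases the label sum, so sum + 1 rounds reach the break
def pvPropagate (roads : List (Int × Int)) : Nat → Bool → List Int → List Int
  | 0, _, label => label
  | fuel + 1, backward, label =>
      let st := pvRelaxPass (if backward then roads.reverse else roads) (label, false)
      if st.2 then pvPropagate roads fuel (!backward) st.1 else st.1

def pvSumNat (xs : List Int) : Nat := (xs.map Int.toNat).sum

def find_minimum_roads_alt (n : Int) (m : Int) (roads : List (Int × Int)) : Int × (List (Int × Int)) :=
  if n < 1 then (-1, []) else
  let label0 : List Int := PySem.List.pyRange 0 (n + 1) 1
  let label := pvPropagate roads (pvSumNat label0 + 1) false label0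
  let reps := (PySem.List.pyRange 1 (n + 1) 1).filter (fun v => pvLget label v == v)
  ((reps.length : Int) - 1, reps.zip (reps.drop 1))

-- ===== PRECONDITION & SPEC =====
-- Pre_ admits every n < 1 (no cities: A returns (-1, []) without reading the roads)
-- and otherwise requires the node ids to lie in 1..n, the function's natural domain:
-- outside it A's visited[] indexing raises IndexError or, via Python's negative-index
-- wraparound, silently conflates distinct node ids — an accident of list indexing
-- with no intended meaning, which B's own (differently shaped) indexing does not
-- reproduce.
def Pre_find_minimum_roads (n : Int) (m : Int) (roads : List (Int × Int)) : Prop :=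
  n < 1 ∨ ∀ p ∈ roads, 1 ≤ p.1 ∧ p.1 ≤ n ∧ 1 ≤ p.2 ∧ p.2 ≤ n
instance (n : Int) (m : Int) (roads : List (Int × Int)) : Decidable (Pre_find_minimum_roads n m roads) := by unfold Pre_find_minimum_roads; infer_instance

def pvWitness_find_minimum_roads : Int × Int × (List (Int × Int)) := (3, 2, [(1, 2), (2, 1)])

def Spec_find_minimum_roads (n : Int) (m : Int) (roads : List (Int × Int)) (out : Int × (List (Int × Int))) : Prop := out = find_minimum_roads_alt n m roads
instance (n : Int) (m : Int) (roads : List (Int × Int)) (out : Int × (List (Int × Int))) : Decidable (Spec_find_minimum_roads n m roads out) := by unfold Spec_find_minimum_roads; infer_instance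

-- ===== CLAIM (what is proved, stated in full; the proofs are below) =====
def Claim_equal_find_minimum_roads : Prop := ∀ (n : Int) (m : Int) (roads : List (Int × Int)), Dom_find_minimum_roads n m roads → Pre_find_minimum_roads n m roads → Spec_find_minimum_roads n m roads (find_minimum_roads n m roads)

-- ===== LEMMAS AND PROOFS =====

-- the undirected edge relation of the road list, and connectivity (its refl-trans closure)
def pvEdge (roads : List (Int × Int)) (x y : Int) : Prop := (x, y) ∈ roads ∨ (y, x) ∈ roads

def pvConn (roads : List (Int × Int)) : Int → Int → Prop := Relation.ReflTransGen (pvEdge roads)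

def pvIsMin (roads : List (Int × Int)) (v : Int) : Prop := ∀ u, pvConn roads u v → v ≤ u


theorem pvEdge_symm {roads : List (Int × Int)} {x y : Int} (h : pvEdge roads x y) : pvEdge roads y x := by
  unfold pvEdge at *; tauto

theorem pvConn_symm {roads : List (Int × Int)} {x y : Int} (h : pvConn roads x y) : pvConn roads y x := by
  induction h with
  | refl => exact Relation.ReflTransGen.refl
  | tail _ he ih => exact Relation.ReflTransGen.head (pvEdge_symm he) ih

theorem pvConn_range {n : Int} {roads : List (Int × Int)}
    (hpre : ∀ p ∈ roads, 1 ≤ p.1 ∧ p.1 ≤ n ∧ 1 ≤ p.2 ∧ p.2 ≤ n) {u v : Int} (h : pvConn roads u v)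
    (hv1 : 1 ≤ v) (hv2 : v ≤ n) : 1 ≤ u ∧ u ≤ n := by
  induction h using Relation.ReflTransGen.head_induction_on with
  | refl => exact ⟨hv1, hv2⟩
  | head he _ _ =>
    rcases he with hm | hm
    · exact ⟨(hpre _ hm).1, (hpre _ hm).2.1⟩
    · exact ⟨(hpre _ hm).2.2.1, (hpre _ hm).2.2.2⟩

-- visited[]-array helper lemmas
theorem pvVget_vset {vis : List Bool} {u : Int} (v : Int)
    (h1 : 1 ≤ u) (hu : u.toNat < vis.length) :
    pvVget (pvVset vis u) v = if v = u then true else pvVget vis v := by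
  by_cases hv : v = u
  · subst hv
    simp [pvVget, pvVset, List.getD, List.getElem?_set_self hu]
  · have hne : u.toNat ≠ v.toNat := by omega
    simp [pvVget, pvVset, List.getD, List.getElem?_set_ne hne, hv]

theorem pvVget_mono {vis : List Bool} {u v : Int}
    (h1 : 1 ≤ u) (hu : u.toNat < vis.length) (h : pvVget vis v = true) :
    pvVget (pvVset vis u) v = true := by
  rw [pvVget_vset v h1 hu]; split <;> simp [h]

theorem length_pvVset (vis : List Bool) (u : Int) : (pvVset vis u).length = vis.length := by
  simp [pvVset]

theorem pvVget_replicate (k : Nat) (v : Int) : pvVget (List.replicate k false) v = false := by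
  simp only [pvVget, List.getD, List.getElem?_replicate]
  split <;> rfl

theorem count_false_set : ∀ (vis : List Bool) (i : Nat) (hi : i < vis.length), vis[i] = false →
    (vis.set i true).count false + 1 = vis.count false := by
  intro vis
  induction vis with
  | nil => intro i h; simp at h
  | cons b tl ih =>
    intro i hi hb
    cases i with
    | zero =>
      have hb0 : b = false := by simpa using hb
      subst hb0
      simp
    | succ j =>
      have hj : j < tl.length := by simpa using hi
      have := ih j hj (by simpa using hb)
      simp only [List.set_cons_succ, List.count_cons]
      omega

theorem count_false_pvVset {vis : List Bool} {u : Int}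
    (hu : u.toNat < vis.length) (hf : pvVget vis u = false) :
    (pvVset vis u).count false + 1 = vis.count false := by
  have hget : vis[u.toNat] = false := by
    rw [← List.getD_eq_getElem vis false hu]; exact hf
  exact count_false_set vis u.toNat hu hget

-- label[]-array helper lemmas
theorem pvLget_pvLset {label : List Int} {u : Int} (v t : Int)
    (h1 : 1 ≤ u) (hu : u.toNat < label.length) :
    pvLget (pvLset label u t) v = if v = u then t else pvLget label v := by
  by_cases hv : v = u
  · subst hv
    simp [pvLget, pvLset, List.getD, List.getElem?_set_self hu]
  · have hne : u.toNat ≠ v.toNat := by omega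
    simp [pvLget, pvLset, List.getD, List.getElem?_set_ne hne, hv]

theorem length_pvLset (label : List Int) (u t : Int) : (pvLset label u t).length = label.length := by
  simp [pvLset]

theorem pvSumNat_set : ∀ (l : List Int) (i : Nat) (t : Int), i < l.length →
    pvSumNat (l.set i t) + (l.getD i 0).toNat = pvSumNat l + t.toNat := by
  intro l
  induction l with
  | nil => intro i t h; simp at h
  | cons x tl ih =>
    intro i t hi
    cases i with
    | zero => simp [pvSumNat, List.getD]; omega
    | succ j =>
      have hj : j < tl.length := by simpa using hi
      have := ih j t hj
      simp only [List.set_cons_succ, pvSumNat, List.map_cons, List.sum_cons, List.getD] at *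
      simp only [List.getElem?_cons_succ]
      omega

theorem pvSumNat_pvLset {label : List Int} {u : Int} (t : Int)
    (hu : u.toNat < label.length) :
    pvSumNat (pvLset label u t) + (pvLget label u).toNat = pvSumNat label + t.toNat := by
  exact pvSumNat_set label u.toNat t hu


-- adjacency lists of pvBuildGraph contain exactly the edge-neighbours
theorem mem_buildGraph_fold : ∀ (rs : List (Int × Int)) (g : PySem.Dict Int (List Int)) (x y : Int),
    (y ∈ (rs.foldl (fun g ab =>
      let g1 := g.insert ab.1 (g.getD ab.1 [] ++ [ab.2])
      g1.insert ab.2 (g1.getD ab.2 [] ++ [ab.1])) g).getD x [] ↔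
      y ∈ g.getD x [] ∨ pvEdge rs x y) := by
  intro rs
  induction rs with
  | nil => intro g x y; simp [pvEdge]
  | cons p tl ih =>
    intro g x y
    rw [List.foldl_cons, ih]
    have hstep : ∀ z, z ∈ ((g.insert p.1 (g.getD p.1 [] ++ [p.2])).insert p.2
        ((g.insert p.1 (g.getD p.1 [] ++ [p.2])).getD p.2 [] ++ [p.1])).getD x [] ↔
        z ∈ g.getD x [] ∨ (x = p.1 ∧ z = p.2) ∨ (x = p.2 ∧ z = p.1) := by
      intro z
      rw [PySem.Dict.getD_insert, PySem.Dict.getD_insert, PySem.Dict.getD_insert]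
      split_ifs <;> simp_all
    constructor
    · rintro (h | h)
      · rcases (hstep y).mp h with h' | ⟨hx, hy⟩ | ⟨hx, hy⟩
        · exact Or.inl h'
        · subst hx; subst hy
          exact Or.inr (Or.inl (List.mem_cons_self ..))
        · subst hx; subst hy
          exact Or.inr (Or.inr (List.mem_cons_self ..))
      · rcases h with h | h
        · exact Or.inr (Or.inl (List.mem_cons_of_mem _ h))
        · exact Or.inr (Or.inr (List.mem_cons_of_mem _ h))
    · rintro (h | h | h)
      · exact Or.inl ((hstep y).mpr (Or.inl h))
      · rcases List.mem_cons.mp h with h | h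
        · refine Or.inl ((hstep y).mpr (Or.inr (Or.inl ?_)))
          have : (x, y) = p := h
          constructor <;> simp [← this]
        · exact Or.inr (Or.inl h)
      · rcases List.mem_cons.mp h with h | h
        · refine Or.inl ((hstep y).mpr (Or.inr (Or.inr ?_)))
          have : (y, x) = p := h
          constructor <;> simp [← this]
        · exact Or.inr (Or.inr h)

theorem mem_buildGraph (roads : List (Int × Int)) (x y : Int) :
    y ∈ (pvBuildGraph roads).getD x [] ↔ pvEdge roads x y := by
  unfold pvBuildGraph
  rw [mem_buildGraph_fold]
  simp [PySem.Dict.getD_empty]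

-- the inner 'for neighbor in graph[curr]' marking fold
theorem pvBfsStep (nbrs : List Int) :
    ∀ (rest : List Int) (vis : List Bool),
    (∀ y ∈ nbrs, 1 ≤ y ∧ y.toNat < vis.length) →
    (let st := nbrs.foldl (fun (st : List Int × List Bool) nb =>
        if pvVget st.2 nb then st else (st.1 ++ [nb], pvVset st.2 nb)) (rest, vis)
     st.2.length = vis.length ∧
     (∀ v, pvVget st.2 v = true ↔ (pvVget vis v = true ∨ v ∈ nbrs)) ∧
     (∃ newq, st.1 = rest ++ newq ∧ (∀ x ∈ newq, x ∈ nbrs) ∧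
       (∀ x, pvVget st.2 x = true → pvVget vis x = true ∨ x ∈ newq) ∧
       st.2.count false + newq.length ≤ vis.count false)) := by
  induction nbrs with
  | nil =>
    intro rest vis _
    refine ⟨rfl, by simp, [], by simp, by simp, fun x h => Or.inl h, by simp⟩
  | cons nb tl ih =>
    intro rest vis hn
    have hnb := hn nb (List.mem_cons_self ..)
    simp only [List.foldl_cons]
    by_cases hm : pvVget vis nb = true
    · rw [if_pos hm]
      obtain ⟨hlen, hiff, newq, hq, hqm, hmk, hcnt⟩ :=
        ih rest vis (fun y hy => hn y (List.mem_cons_of_mem _ hy))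
      refine ⟨hlen, fun v => ?_, newq, hq, fun x hx => List.mem_cons_of_mem _ (hqm x hx),
        fun x hx => (hmk x hx).imp id id, hcnt⟩
      rw [hiff v]
      constructor
      · rintro (h | h)
        · exact Or.inl h
        · exact Or.inr (List.mem_cons_of_mem _ h)
      · rintro (h | h)
        · exact Or.inl h
        · rcases List.mem_cons.mp h with h | h
          · subst h; exact Or.inl hm
          · exact Or.inr h
    · rw [if_neg hm]
      have hm' : pvVget vis nb = false := by simpa using hm
      have hlen' : (pvVset vis nb).length = vis.length := length_pvVset vis nb
      obtain ⟨hlen, hiff, newq, hq, hqm, hmk, hcnt⟩ :=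
        ih (rest ++ [nb]) (pvVset vis nb)
          (fun y hy => by
            obtain ⟨h1, h2⟩ := hn y (List.mem_cons_of_mem _ hy)
            exact ⟨h1, by rw [hlen']; exact h2⟩)
      refine ⟨by rw [hlen, hlen'], fun v => ?_, nb :: newq, by rw [hq, List.append_assoc]; rfl,
        ?_, ?_, ?_⟩
      · rw [hiff v, pvVget_vset v hnb.1 hnb.2]
        split <;> rename_i hv
        · subst hv; simp
        · constructor
          · rintro (h | h)
            · exact Or.inl h
            · exact Or.inr (List.mem_cons_of_mem _ h)
          · rintro (h | h)
            · exact Or.inl h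
            · rcases List.mem_cons.mp h with h | h
              · exact absurd h hv
              · exact Or.inr h
      · intro x hx
        rcases List.mem_cons.mp hx with h | h
        · subst h; exact List.mem_cons_self ..
        · exact List.mem_cons_of_mem _ (hqm x h)
      · intro x hx
        rcases hmk x hx with h | h
        · rw [pvVget_vset x hnb.1 hnb.2] at h
          by_cases hv : x = nb
          · subst hv; exact Or.inr (List.mem_cons_self ..)
          · rw [if_neg hv] at h; exact Or.inl h
        · exact Or.inr (List.mem_cons_of_mem _ h)
      · have := count_false_pvVset hnb.2 hm'
        simp only [List.length_cons]
        omega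


-- the 'while queue:' loop visits exactly the old marks plus city's component
theorem pvBfsLoop_spec {n : Int} {roads : List (Int × Int)}
    (hpre : ∀ p ∈ roads, 1 ≤ p.1 ∧ p.1 ≤ n ∧ 1 ≤ p.2 ∧ p.2 ≤ n) {city : Int}
    (hc1 : 1 ≤ city) (hc2 : city ≤ n) :
    ∀ (fuel : Nat) (q : List Int) (vis : List Bool) (comp : List Int),
    vis.count false + q.length < fuel →
    (∀ v : Int, 1 ≤ v → v ≤ n → v.toNat < vis.length) →
    (∀ x ∈ q, pvVget vis x = true ∧ pvConn roads x city) →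
    pvVget vis city = true →
    (∀ x, pvVget vis x = true → x ∈ q ∨ ∀ y, pvEdge roads x y → pvVget vis y = true) →
    (let r := pvBfsLoop (pvBuildGraph roads) fuel q vis comp
     r.2.length = vis.length ∧
     (∀ v, pvVget r.2 v = true ↔ (pvVget vis v = true ∨ pvConn roads v city)) ∧
     (∃ t, r.1 = comp ++ q.take 1 ++ t)) := by
  intro fuel
  induction fuel with
  | zero => intro q vis comp hfuel; omega
  | succ f ih =>
    intro q vis comp hfuel hlen hq hcity hclosed
    match q with
    | [] =>
      refine ⟨rfl, fun v => ?_, [], by simp [pvBfsLoop]⟩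
      constructor
      · exact fun h => Or.inl h
      · rintro (h | h)
        · exact h
        · -- every node connected to city is marked: the marked set is edge-closed
          have hmarked : ∀ z, pvConn roads city z → pvVget vis z = true := by
            intro z hz
            induction hz with
            | refl => exact hcity
            | tail _ he ihz =>
              rcases hclosed _ ihz with hmem | hcl
              · exact absurd hmem (List.not_mem_nil)
              · exact hcl _ he
          exact hmarked v (pvConn_symm h)
    | curr :: rest =>
      have hcurr := hq curr (List.mem_cons_self ..)
      have hnbrs : ∀ y ∈ (pvBuildGraph roads).getD curr [], 1 ≤ y ∧ y.toNat < vis.length := by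
        intro y hy
        have he : pvEdge roads curr y := (mem_buildGraph roads curr y).mp hy
        have hy' : pvConn roads y city :=
          Relation.ReflTransGen.head (pvEdge_symm he) hcurr.2
        have := pvConn_range hpre hy' hc1 hc2
        exact ⟨this.1, hlen y this.1 this.2⟩
      obtain ⟨hlen2, hiff, newq, hq', hqm, hmk, hcnt⟩ :=
        pvBfsStep ((pvBuildGraph roads).getD curr []) rest vis hnbrs
      set st := ((pvBuildGraph roads).getD curr []).foldl
        (fun (st : List Int × List Bool) nb =>
          if pvVget st.2 nb then st else (st.1 ++ [nb], pvVset st.2 nb)) (rest, vis) with hst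
      have hnbconn : ∀ y ∈ (pvBuildGraph roads).getD curr [], pvConn roads y city := by
        intro y hy
        exact Relation.ReflTransGen.head (pvEdge_symm ((mem_buildGraph roads curr y).mp hy)) hcurr.2
      -- re-establish the invariants for the next state
      have hlen' : ∀ v : Int, 1 ≤ v → v ≤ n → v.toNat < st.2.length := by
        intro v h1 h2; rw [hlen2]; exact hlen v h1 h2
      have hq'' : ∀ x ∈ st.1, pvVget st.2 x = true ∧ pvConn roads x city := by
        intro x hx
        rw [hq'] at hx
        rcases List.mem_append.mp hx with hx | hx
        · have := hq x (List.mem_cons_of_mem _ hx)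
          exact ⟨(hiff x).mpr (Or.inl this.1), this.2⟩
        · have hxn := hqm x hx
          exact ⟨(hiff x).mpr (Or.inr hxn), hnbconn x hxn⟩
      have hcity' : pvVget st.2 city = true := (hiff city).mpr (Or.inl hcity)
      have hclosed' : ∀ x, pvVget st.2 x = true →
          x ∈ st.1 ∨ ∀ y, pvEdge roads x y → pvVget st.2 y = true := by
        intro x hx
        rcases hmk x hx with hold | hnew
        · rcases hclosed x hold with hmem | hcl
          · rcases List.mem_cons.mp hmem with hx1 | hx1
            · subst hx1
              refine Or.inr (fun y hy => (hiff y).mpr (Or.inr ?_))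
              exact (mem_buildGraph roads x y).mpr hy
            · exact Or.inl (by rw [hq']; exact List.mem_append_left _ hx1)
          · exact Or.inr (fun y hy => (hiff y).mpr (Or.inl (hcl y hy)))
        · exact Or.inl (by rw [hq']; exact List.mem_append_right _ hnew)
      have hfuel' : st.2.count false + st.1.length < f := by
        have : st.1.length = rest.length + newq.length := by rw [hq']; simp
        simp only [List.length_cons] at hfuel
        omega
      obtain ⟨hL, hI, t, ht⟩ := ih st.1 st.2 (comp ++ [curr]) hfuel' hlen' hq'' hcity' hclosed'
      have hnbsub : ∀ v, v ∈ (pvBuildGraph roads).getD curr [] → pvConn roads v city :=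
        hnbconn
      have hunf : pvBfsLoop (pvBuildGraph roads) (f + 1) (curr :: rest) vis comp =
          pvBfsLoop (pvBuildGraph roads) f st.1 st.2 (comp ++ [curr]) := by rw [hst]; rfl
      refine ⟨by rw [hunf, hL, hlen2], fun v => ?_, ?_⟩
      · rw [hunf, hI v, hiff v]
        constructor
        · rintro ((h | h) | h)
          · exact Or.inl h
          · exact Or.inr (hnbsub v h)
          · exact Or.inr h
        · rintro (h | h)
          · exact Or.inl (Or.inl h)
          · exact Or.inr h
      · -- the component list grows by curr first
        rw [hunf, ht]
        exact ⟨st.1.take 1 ++ t, by simp⟩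


-- B-side invariant: labels are nonnegative, bounded by their index, and connected to it
def pvInv (n : Int) (roads : List (Int × Int)) (label : List Int) : Prop :=
  label.length = (n + 1).toNat ∧ ∀ v, 1 ≤ v → v ≤ n →
    0 ≤ pvLget label v ∧ pvLget label v ≤ v ∧ pvConn roads (pvLget label v) v

theorem pvInv_pvLset {n : Int} {roads : List (Int × Int)} {cur : List Int} {w t : Int}
    (hinv : pvInv n roads cur) (hw1 : 1 ≤ w) (hw2 : w ≤ n)
    (ht0 : 0 ≤ t) (htw : t ≤ w) (htc : pvConn roads t w) :
    pvInv n roads (pvLset cur w t) := by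
  obtain ⟨hlen, hv⟩ := hinv
  have hwlen : w.toNat < cur.length := by omega
  refine ⟨by rw [length_pvLset]; exact hlen, fun v h1 h2 => ?_⟩
  rw [pvLget_pvLset v t hw1 hwlen]
  split <;> rename_i hvw
  · subst hvw; exact ⟨ht0, htw, htc⟩
  · exact hv v h1 h2

theorem pvRelaxStepFn_eval_lt {cur : List Int} {ch : Bool} {p : Int × Int}
    (hcmp : pvLget cur p.1 < pvLget cur p.2) :
    pvRelaxStepFn (cur, ch) p = (pvLset cur p.2 (pvLget cur p.1), true) := by
  simp only [pvRelaxStepFn, ne_eq]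
  split_ifs <;> simp_all

theorem pvRelaxStepFn_eval_eq {cur : List Int} {ch : Bool} {p : Int × Int}
    (heq : pvLget cur p.1 = pvLget cur p.2) :
    pvRelaxStepFn (cur, ch) p = (cur, ch) := by
  simp only [pvRelaxStepFn, ne_eq]
  split_ifs <;> simp_all

theorem pvRelaxStepFn_eval_gt {cur : List Int} {ch : Bool} {p : Int × Int}
    (h1 : 1 ≤ p.1) (hlen : p.1.toNat < cur.length)
    (hcmp : pvLget cur p.2 < pvLget cur p.1) :
    pvRelaxStepFn (cur, ch) p = (pvLset cur p.1 (pvLget cur p.2), true) := by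
  have hset := pvLget_pvLset (label := cur) p.2 (pvLget cur p.2) h1 hlen
  simp only [pvRelaxStepFn, ne_eq]
  split_ifs <;> simp_all
  omega

theorem pvRelaxStepFn_spec {n : Int} {roads : List (Int × Int)}
    (hpre : ∀ p ∈ roads, 1 ≤ p.1 ∧ p.1 ≤ n ∧ 1 ≤ p.2 ∧ p.2 ≤ n)
    {cur : List Int} {ch : Bool} {p : Int × Int} (hp : p ∈ roads) (hinv : pvInv n roads cur) :
    pvInv n roads (pvRelaxStepFn (cur, ch) p).1 ∧
    ((pvRelaxStepFn (cur, ch) p = (cur, ch) ∧ pvLget cur p.1 = pvLget cur p.2) ∨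
     ((pvRelaxStepFn (cur, ch) p).2 = true ∧
      pvSumNat (pvRelaxStepFn (cur, ch) p).1 < pvSumNat cur)) := by
  obtain ⟨ha1, ha2, hb1, hb2⟩ := hpre p hp
  have halen : p.1.toNat < cur.length := by have := hinv.1; omega
  have hblen : p.2.toNat < cur.length := by have := hinv.1; omega
  obtain ⟨hla0, hlaa, hlac⟩ := hinv.2 p.1 ha1 ha2
  obtain ⟨hlb0, hlbb, hlbc⟩ := hinv.2 p.2 hb1 hb2
  rcases lt_trichotomy (pvLget cur p.1) (pvLget cur p.2) with hcmp | hcmp | hcmp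
  · rw [pvRelaxStepFn_eval_lt hcmp]
    have hconn : pvConn roads (pvLget cur p.1) p.2 :=
      Relation.ReflTransGen.tail hlac (Or.inl (by rwa [Prod.mk.eta]))
    have hsum := pvSumNat_pvLset (label := cur) (u := p.2) (pvLget cur p.1) hblen
    exact ⟨pvInv_pvLset hinv hb1 hb2 hla0 (by omega) hconn,
      Or.inr ⟨rfl, show pvSumNat (pvLset cur p.2 (pvLget cur p.1)) < pvSumNat cur by omega⟩⟩
  · rw [pvRelaxStepFn_eval_eq hcmp]
    exact ⟨hinv, Or.inl ⟨rfl, hcmp⟩⟩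
  · rw [pvRelaxStepFn_eval_gt ha1 halen hcmp]
    have hconn : pvConn roads (pvLget cur p.2) p.1 :=
      Relation.ReflTransGen.tail hlbc (Or.inr (by rwa [Prod.mk.eta]))
    have hsum := pvSumNat_pvLset (label := cur) (u := p.1) (pvLget cur p.2) halen
    exact ⟨pvInv_pvLset hinv ha1 ha2 hlb0 (by omega) hconn,
      Or.inr ⟨rfl, show pvSumNat (pvLset cur p.1 (pvLget cur p.2)) < pvSumNat cur by omega⟩⟩


theorem pvRelaxPass_spec {n : Int} {roads : List (Int × Int)}
    (hpre : ∀ p ∈ roads, 1 ≤ p.1 ∧ p.1 ≤ n ∧ 1 ≤ p.2 ∧ p.2 ≤ n) :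
    ∀ (rs : List (Int × Int)), (∀ p ∈ rs, p ∈ roads) →
    ∀ (cur : List Int) (ch : Bool), pvInv n roads cur →
    (pvInv n roads (pvRelaxPass rs (cur, ch)).1 ∧
     ((pvRelaxPass rs (cur, ch) = (cur, ch) ∧ ∀ p ∈ rs, pvLget cur p.1 = pvLget cur p.2) ∨
      ((pvRelaxPass rs (cur, ch)).2 = true ∧
       pvSumNat (pvRelaxPass rs (cur, ch)).1 < pvSumNat cur))) := by
  intro rs
  induction rs with
  | nil =>
    intro _ cur ch hinv
    exact ⟨hinv, Or.inl ⟨rfl, by simp⟩⟩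
  | cons p tl ih =>
    intro hmem cur ch hinv
    have hp : p ∈ roads := hmem p (List.mem_cons_self ..)
    obtain ⟨hinv1, hout⟩ := pvRelaxStepFn_spec hpre hp hinv
    have hpass : pvRelaxPass (p :: tl) (cur, ch) =
        pvRelaxPass tl (pvRelaxStepFn (cur, ch) p) := by
      simp [pvRelaxPass]
    rcases hout with ⟨hid, heq⟩ | ⟨hch, hsum⟩
    · rw [hpass, hid]
      obtain ⟨hinv2, hout2⟩ := ih (fun q hq => hmem q (List.mem_cons_of_mem _ hq)) cur ch hinv
      refine ⟨hinv2, ?_⟩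
      rcases hout2 with ⟨hid2, heq2⟩ | hr
      · refine Or.inl ⟨hid2, fun q hq => ?_⟩
        rcases List.mem_cons.mp hq with h | h
        · subst h; exact heq
        · exact heq2 q h
      · exact Or.inr hr
    · rw [hpass]
      have hpair : pvRelaxStepFn (cur, ch) p =
          ((pvRelaxStepFn (cur, ch) p).1, (pvRelaxStepFn (cur, ch) p).2) := rfl
      rw [hpair, hch]
      obtain ⟨hinv2, hout2⟩ :=
        ih (fun q hq => hmem q (List.mem_cons_of_mem _ hq)) (pvRelaxStepFn (cur, ch) p).1 true hinv1
      refine ⟨hinv2, Or.inr ?_⟩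
      rcases hout2 with ⟨hid2, _⟩ | ⟨hch2, hsum2⟩
      · rw [hid2]; exact ⟨rfl, hsum⟩
      · exact ⟨hch2, by omega⟩

theorem pvPropagate_spec {n : Int} {roads : List (Int × Int)}
    (hpre : ∀ p ∈ roads, 1 ≤ p.1 ∧ p.1 ≤ n ∧ 1 ≤ p.2 ∧ p.2 ≤ n) :
    ∀ (fuel : Nat) (backward : Bool) (label : List Int), pvInv n roads label →
    pvSumNat label < fuel →
    (pvInv n roads (pvPropagate roads fuel backward label) ∧
     ∀ p ∈ roads, pvLget (pvPropagate roads fuel backward label) p.1 =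
       pvLget (pvPropagate roads fuel backward label) p.2) := by
  intro fuel
  induction fuel with
  | zero => intro backward label _ h; omega
  | succ f ih =>
    intro backward label hinv hsum
    have hmem : ∀ p ∈ (if backward then roads.reverse else roads), p ∈ roads := by
      intro p hp
      split at hp
      · exact List.mem_reverse.mp hp
      · exact hp
    obtain ⟨hinv1, hout⟩ :=
      pvRelaxPass_spec hpre (if backward then roads.reverse else roads) hmem label false hinv
    have hunf : pvPropagate roads (f + 1) backward label =
        (if (pvRelaxPass (if backward then roads.reverse else roads) (label, false)).2 then
          pvPropagate roads f (!backward)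
            (pvRelaxPass (if backward then roads.reverse else roads) (label, false)).1
        else (pvRelaxPass (if backward then roads.reverse else roads) (label, false)).1) := rfl
    rcases hout with ⟨hid, heq⟩ | ⟨hch, hsum2⟩
    · rw [hunf, hid]
      simp only [if_neg (by simp : ¬ (false = true))]
      refine ⟨hinv, fun p hp => ?_⟩
      have hp' : p ∈ (if backward then roads.reverse else roads) := by
        split
        · exact List.mem_reverse.mpr hp
        · exact hp
      exact heq p hp'
    · rw [hunf, hch, if_pos rfl]
      exact ih (!backward) _ hinv1 (by omega)

-- at a fixpoint, labels are constant on connected components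
theorem pvLabel_const {roads : List (Int × Int)} {label : List Int}
    (hfix : ∀ p ∈ roads, pvLget label p.1 = pvLget label p.2) :
    ∀ x y, pvConn roads x y → pvLget label x = pvLget label y := by
  intro x y h
  induction h with
  | refl => rfl
  | tail _ he ihc =>
    rcases he with hm | hm
    · exact ihc.trans (hfix _ hm)
    · exact ihc.trans (hfix _ hm).symm

theorem pvLabel_min_iff {n : Int} {roads : List (Int × Int)}
    (hpre : ∀ p ∈ roads, 1 ≤ p.1 ∧ p.1 ≤ n ∧ 1 ≤ p.2 ∧ p.2 ≤ n) {label : List Int}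
    (hinv : pvInv n roads label)
    (hfix : ∀ p ∈ roads, pvLget label p.1 = pvLget label p.2)
    {v : Int} (hv1 : 1 ≤ v) (hv2 : v ≤ n) :
    (pvLget label v = v) ↔ pvIsMin roads v := by
  obtain ⟨_, hlab⟩ := hinv
  obtain ⟨hl0, hlv, hlc⟩ := hlab v hv1 hv2
  constructor
  · intro hlv' u hconn
    obtain ⟨hu1, hu2⟩ := pvConn_range hpre hconn hv1 hv2
    have := (hlab u hu1 hu2).2.1
    have heq : pvLget label u = pvLget label v := pvLabel_const hfix u v hconn
    omega
  · intro hmin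
    have := hmin (pvLget label v) hlc
    omega


theorem pvUnvisited_iff_min {n : Int} {roads : List (Int × Int)}
    (hpre : ∀ p ∈ roads, 1 ≤ p.1 ∧ p.1 ≤ n ∧ 1 ≤ p.2 ∧ p.2 ≤ n) {c : Int} (hc1 : 1 ≤ c) (hc2 : c ≤ n) :
    (¬ ∃ u, 1 ≤ u ∧ u ≤ c - 1 ∧ pvConn roads u c) ↔ pvIsMin roads c := by
  constructor
  · intro h u hconn
    obtain ⟨hu1, hu2⟩ := pvConn_range hpre hconn hc1 hc2
    by_contra hlt
    exact h ⟨u, hu1, by omega, hconn⟩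
  · rintro hmin ⟨u, h1, h2, hconn⟩
    have := hmin u hconn
    omega

-- the 'for city in range(1, n+1)' outer loop: visited is the union of the components
-- with minimum ≤ c, and the collected BFS heads are the component minima in order
theorem pvOuter {n : Int} {roads : List (Int × Int)}
    (hpre : ∀ p ∈ roads, 1 ≤ p.1 ∧ p.1 ≤ n ∧ 1 ≤ p.2 ∧ p.2 ≤ n) (P : Int → Bool)
    (hP : ∀ v, 1 ≤ v → v ≤ n → (P v = true ↔ pvIsMin roads v)) :
    ∀ (c : Nat), (c : Int) ≤ n →
    (let st := (PySem.List.pyRange 1 ((c : Int) + 1) 1).foldl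
        (fun (st : List (List Int) × List Bool) city =>
          if pvVget st.2 city then st
          else
            let r := pvBfsLoop (pvBuildGraph roads) (st.2.length + 1) [city] (pvVset st.2 city) []
            (st.1 ++ [r.1], r.2)) ([], List.replicate (n + 1).toNat false)
     st.2.length = (n + 1).toNat ∧
     (∀ v, pvVget st.2 v = true ↔ ∃ u, 1 ≤ u ∧ u ≤ (c : Int) ∧ pvConn roads u v) ∧
     st.1.map (fun comp => comp.getD 0 0) = (PySem.List.pyRange 1 ((c : Int) + 1) 1).filter P) := by
  intro c
  induction c with
  | zero =>
    intro _
    rw [PySem.List.pyRange_one_eq_nil (by norm_num)]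
    simp only [List.foldl_nil]
    refine ⟨by simp, fun v => ?_, by simp⟩
    constructor
    · intro h
      have h' : pvVget (List.replicate (n + 1).toNat false) v = true := h
      rw [pvVget_replicate] at h'
      cases h'
    · rintro ⟨u, h1, h2, _⟩; push_cast at h2; omega
  | succ c ih =>
    intro hc
    have hc' : (c : Int) ≤ n := by push_cast at hc ⊢; omega
    have hcity1 : (1 : Int) ≤ (c : Int) + 1 := by omega
    have hcity2 : (c : Int) + 1 ≤ n := by push_cast at hc; omega
    have hsplit : PySem.List.pyRange 1 ((((c : Nat) + 1 : Nat) : Int) + 1) 1 =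
        PySem.List.pyRange 1 ((c : Int) + 1) 1 ++ [(c : Int) + 1] := by
      push_cast
      exact PySem.List.pyRange_one_succ_right hcity1
    rw [hsplit, List.foldl_append]
    obtain ⟨hlen, hmk, hhd⟩ := ih hc'
    set stc := (PySem.List.pyRange 1 ((c : Int) + 1) 1).foldl
        (fun (st : List (List Int) × List Bool) city =>
          if pvVget st.2 city then st
          else
            let r := pvBfsLoop (pvBuildGraph roads) (st.2.length + 1) [city] (pvVset st.2 city) []
            (st.1 ++ [r.1], r.2)) ([], List.replicate (n + 1).toNat false) with hstc
    set city := (c : Int) + 1 with hcitydef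
    by_cases hvis : pvVget stc.2 city = true
    · -- city already visited: it is not its component's minimum
      rw [List.foldl_cons, List.foldl_nil, if_pos hvis]
      obtain ⟨u0, hu01, hu02, hconn0⟩ := (hmk city).mp hvis
      have hnotmin : ¬ pvIsMin roads city := by
        rw [← pvUnvisited_iff_min hpre hcity1 hcity2]
        intro h
        exact h ⟨u0, hu01, by omega, hconn0⟩
      have hPf : P city = false := by
        rcases Bool.eq_false_or_eq_true (P city) with h | h
        · exact absurd ((hP city hcity1 hcity2).mp h) hnotmin
        · exact h
      refine ⟨hlen, fun v => ?_, ?_⟩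
      · rw [hmk v]
        constructor
        · rintro ⟨u, h1, h2, hcu⟩; exact ⟨u, h1, by push_cast; omega, hcu⟩
        · rintro ⟨u, h1, h2, hcu⟩
          by_cases hu : u ≤ (c : Int)
          · exact ⟨u, h1, hu, hcu⟩
          · have : u = city := by push_cast at h2; omega
            subst this
            exact ⟨u0, hu01, hu02, Relation.ReflTransGen.trans hconn0 hcu⟩
      · rw [List.filter_append, hhd]
        simp [hPf]
    · -- city unvisited: BFS visits exactly its component, city is its minimum
      rw [List.foldl_cons, List.foldl_nil, if_neg (by simp [hvis])]
      have hvisf : pvVget stc.2 city = false := by simpa using hvis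
      have hmin : pvIsMin roads city := by
        rw [← pvUnvisited_iff_min hpre hcity1 hcity2]
        rintro ⟨u, h1, h2, hconn⟩
        exact hvis ((hmk city).mpr ⟨u, h1, by omega, hconn⟩)
      have hPt : P city = true := (hP city hcity1 hcity2).mpr hmin
      have hcitylen : city.toNat < stc.2.length := by rw [hlen]; omega
      have hcnt := count_false_pvVset hcitylen hvisf
      have hlenv : ∀ v : Int, 1 ≤ v → v ≤ n → v.toNat < (pvVset stc.2 city).length := by
        intro v h1 h2; rw [length_pvVset, hlen]; omega
      have hcityv : pvVget (pvVset stc.2 city) city = true := by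
        rw [pvVget_vset city hcity1 hcitylen, if_pos rfl]
      obtain ⟨hL, hIff, t, ht⟩ := pvBfsLoop_spec hpre hcity1 hcity2
        (stc.2.length + 1) [city] (pvVset stc.2 city) []
        (by
          have hle := List.count_le_length (l := stc.2) (a := false)
          simp only [List.length_cons, List.length_nil]
          omega)
        hlenv
        (by
          intro x hx
          rcases List.mem_cons.mp hx with h | h
          · subst h; exact ⟨hcityv, Relation.ReflTransGen.refl⟩
          · exact absurd h (List.not_mem_nil))
        hcityv
        (by
          intro x hx
          rw [pvVget_vset x hcity1 hcitylen] at hx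
          by_cases hxc : x = city
          · exact Or.inl (by rw [hxc]; exact List.mem_cons_self ..)
          · rw [if_neg hxc] at hx
            obtain ⟨u, h1, h2, hconn⟩ := (hmk x).mp hx
            refine Or.inr (fun y hy => ?_)
            have : pvVget stc.2 y = true :=
              (hmk y).mpr ⟨u, h1, h2, Relation.ReflTransGen.tail hconn hy⟩
            exact pvVget_mono hcity1 hcitylen this)
      refine ⟨by rw [hL, length_pvVset, hlen], fun v => ?_, ?_⟩
      · rw [hIff v, pvVget_vset v hcity1 hcitylen]
        constructor
        · rintro (h | h)
          · split at h
            · rename_i hvc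
              exact ⟨city, hcity1, by push_cast; omega, by rw [← hvc]; exact Relation.ReflTransGen.refl⟩
            · obtain ⟨u, h1, h2, hconn⟩ := (hmk v).mp h
              exact ⟨u, h1, by push_cast; omega, hconn⟩
          · exact ⟨city, hcity1, by push_cast; omega, pvConn_symm h⟩
        · rintro ⟨u, h1, h2, hconn⟩
          by_cases hu : u ≤ (c : Int)
          · by_cases hvc : v = city
            · rw [if_pos hvc]; exact Or.inl rfl
            · rw [if_neg hvc]; exact Or.inl ((hmk v).mpr ⟨u, h1, hu, hconn⟩)
          · have : u = city := by push_cast at h2; omega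
            subst this
            exact Or.inr (pvConn_symm hconn)
      · rw [List.filter_append, List.map_append, hhd, List.map_cons, List.map_nil]
        have hhead : ((pvBfsLoop (pvBuildGraph roads) (stc.2.length + 1) [city]
            (pvVset stc.2 city) []).1).getD 0 0 = city := by
          rw [ht]; rfl
        rw [hhead]
        simp [hPt]

theorem pvPairs (comps : List (List Int)) :
    (PySem.List.pyRange 0 ((comps.length : Int) - 1) 1).map
      (fun i => ((comps.getD i.toNat []).getD 0 0, (comps.getD (i.toNat + 1) []).getD 0 0)) =
    (comps.map (fun c => c.getD 0 0)).zip ((comps.map (fun c => c.getD 0 0)).drop 1) := by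
  rw [PySem.List.pyRange_one]
  have hlen : ((comps.length : Int) - 1 - 0).toNat = comps.length - 1 := by omega
  rw [hlen]
  apply List.ext_getElem
  · simp only [List.length_map, List.length_range, List.length_zip, List.length_drop]
    omega
  · intro j hj1 hj2
    simp only [List.length_map, List.length_range] at hj1
    have hj : j < comps.length - 1 := hj1
    have hjc : j < comps.length := by omega
    have hjc1 : j + 1 < comps.length := by omega
    simp only [List.getElem_map, List.getElem_range, List.getElem_zip, List.getElem_drop]
    have h0 : ((0 : Int) + (j : Int)).toNat = j := by omega
    rw [h0]
    rw [List.getD_eq_getElem comps [] hjc, List.getD_eq_getElem comps [] hjc1]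
    simp [Nat.add_comm]

-- ===== VERDICT (by name: the statement is the Claim_ definition above) =====
theorem find_minimum_roads_spec : Claim_equal_find_minimum_roads := by
  intro n m roads _ hpre
  unfold Spec_find_minimum_roads
  by_cases hn : n < 1
  · -- no cities: both return (-1, [])
    have h1 : PySem.List.pyRange 1 (n + 1) 1 = [] := PySem.List.pyRange_one_eq_nil (by omega)
    simp only [find_minimum_roads, find_minimum_roads_alt, h1, List.foldl_nil, List.filter_nil,
      List.length_nil, List.zip_nil_left]
    rw [PySem.List.pyRange_one_eq_nil (by norm_num), List.map_nil, if_pos hn]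
    norm_num
  · have hn1 : 1 ≤ n := by omega
    have hpre0 : ∀ p ∈ roads, 1 ≤ p.1 ∧ p.1 ≤ n ∧ 1 ≤ p.2 ∧ p.2 ≤ n :=
      hpre.resolve_left (by omega)
    simp only [find_minimum_roads, find_minimum_roads_alt, if_neg hn]
    -- B-side: the initial labels satisfy the invariant
    have hlen0 : (PySem.List.pyRange 0 (n + 1) 1).length = (n + 1).toNat := by
      rw [PySem.List.length_pyRange_one]; omega
    have hget0 : ∀ v : Int, 1 ≤ v → v ≤ n → pvLget (PySem.List.pyRange 0 (n + 1) 1) v = v := by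
      intro v h1 h2
      have hvl : v.toNat < (PySem.List.pyRange 0 (n + 1) 1).length := by omega
      rw [pvLget, List.getD_eq_getElem _ 0 hvl, PySem.List.getElem_pyRange_one]
      omega
    have hinv0 : pvInv n roads (PySem.List.pyRange 0 (n + 1) 1) := by
      refine ⟨hlen0, fun v h1 h2 => ?_⟩
      rw [hget0 v h1 h2]
      exact ⟨by omega, le_refl v, Relation.ReflTransGen.refl⟩
    obtain ⟨hinvF, hfixF⟩ := pvPropagate_spec hpre0
      (pvSumNat (PySem.List.pyRange 0 (n + 1) 1) + 1) false
      (PySem.List.pyRange 0 (n + 1) 1) hinv0 (by omega)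
    set label := pvPropagate roads (pvSumNat (PySem.List.pyRange 0 (n + 1) 1) + 1) false
      (PySem.List.pyRange 0 (n + 1) 1) with hlabF
    have hP : ∀ v, 1 ≤ v → v ≤ n →
        ((fun v => pvLget label v == v) v = true ↔ pvIsMin roads v) := by
      intro v h1 h2
      simp only [beq_iff_eq]
      exact pvLabel_min_iff hpre0 hinvF hfixF h1 h2
    have hcast : ((n.toNat : Nat) : Int) = n := Int.toNat_of_nonneg (by omega)
    obtain ⟨hlenS, hmkS, hhdS⟩ :=
      pvOuter hpre0 (fun v => pvLget label v == v) hP n.toNat (by rw [hcast])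
    rw [hcast] at hhdS
    set stf := (PySem.List.pyRange 1 (n + 1) 1).foldl
        (fun (st : List (List Int) × List Bool) city =>
          if pvVget st.2 city then st
          else
            let r := pvBfsLoop (pvBuildGraph roads) (st.2.length + 1) [city] (pvVset st.2 city) []
            (st.1 ++ [r.1], r.2)) ([], List.replicate (n + 1).toNat false) with hstf
    have hlencomp : stf.1.length =
        ((PySem.List.pyRange 1 (n + 1) 1).filter (fun v => pvLget label v == v)).length := by
      rw [← hhdS, List.length_map]
    have hpairs := pvPairs stf.1
    rw [hhdS] at hpairs
    refine Prod.ext ?_ ?_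
    · simp only
      rw [hlencomp]
    · simp only
      rw [hpairs]
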